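-- pv_equiv track=rewrite | github.com/towmi06/PYTHON_PTIT | code_ptit/Bieuthucdaungoac.py | pro
-- ===== SOURCE A (Python) =====
-- def pro(s):
--     stack = []
--     res = []
--     cnt = 0
--     for i in s:
--         if i == '(':
--             cnt +=1
--             stack.append(cnt)
--             res.append(cnt)
--         elif i == ')':
--             res.append(stack.pop())
--     return res
-- ===== SOURCE B (Python) =====
-- def pro(s):
--     res = []
--     n = len(s)
--     state = [0, 0]  # [position, open-counter]
--
--     def parse():
--         # consume chars from the current position; on '(' emit a fresh label,
--         # recurse for the enclosed content and re-emit the label if the group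
--         # was actually closed; return True when a ')' at this level is consumed.
--         while state[0] < n:
--             c = s[state[0]]
--             state[0] += 1
--             if c == '(':
--                 state[1] += 1
--                 label = state[1]
--                 res.append(label)
--                 if parse():
--                     res.append(label)
--             elif c == ')':
--                 return True
--         return False
--
--     parse()
--     return res
-- ===== Notes on version B (the rewrite author's own statement) =====
-- stated objective: alternative
-- what changed: Replaced the explicit label stack by a recursive-descent parser over a shared position index: each '(' captures its label in a local variable, recursion handles the enclosed content, and the label is re-emitted when the matching ')' is consumed.
import Mathlib
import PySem

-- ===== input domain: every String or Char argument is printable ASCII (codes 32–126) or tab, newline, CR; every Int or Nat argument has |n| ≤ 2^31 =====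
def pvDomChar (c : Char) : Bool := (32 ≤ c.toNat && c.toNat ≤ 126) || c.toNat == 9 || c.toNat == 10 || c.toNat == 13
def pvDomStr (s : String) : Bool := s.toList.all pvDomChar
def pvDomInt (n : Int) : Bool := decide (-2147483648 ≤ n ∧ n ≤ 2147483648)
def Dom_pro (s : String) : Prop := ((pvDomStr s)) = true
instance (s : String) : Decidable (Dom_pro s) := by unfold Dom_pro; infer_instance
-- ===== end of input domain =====

-- B replaces A's explicit label stack by a recursive-descent parser (alternative decomposition; same cost).

-- ===== PORT A =====
-- A's for-loop over the characters with state (stack, res, cnt); stack.pop() on an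
-- empty stack raises IndexError, rendered as `none` (excluded by Pre_pro).
def proRun : List Char → List Int → List Int → Int → Option (List Int)
  | [], _, res, _ => some res
  | c :: t, stack, res, cnt =>
    if c = '(' then
      proRun t (stack ++ [cnt + 1]) (res ++ [cnt + 1]) (cnt + 1)
    else if c = ')' then
      match PySem.List.pop? stack with
      | none => none
      | some (x, stack') => proRun t stack' (res ++ [x]) cnt
    else proRun t stack res cnt

def pro (s : String) : List Int := (proRun s.toList [] [] 0).getD []

-- ===== PORT B =====
-- B's recursive-descent `parse`: parseB l cnt = (emitted labels, new counter,
-- remaining input, whether a ')' at this level was consumed); the subtype carries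
-- `rest.length ≤ l.length` for termination of the nested call.
def parseB : (l : List Char) → (cnt : Int) →
    {r : List Int × Int × List Char × Bool // r.2.2.1.length ≤ l.length}
  | [], cnt => ⟨([], cnt, [], false), by simp⟩
  | c :: t, cnt =>
    if c = '(' then
      match parseB t (cnt + 1) with
      | ⟨(r1, cnt1, rest1, b1), h1⟩ =>
        match parseB rest1 cnt1 with
        | ⟨(r2, cnt2, rest2, b2), h2⟩ =>
          ⟨((cnt + 1) :: (r1 ++ (if b1 then [cnt + 1] else []) ++ r2),
            cnt2, rest2, b2),
           by dsimp only at h1 h2; simp only [List.length_cons]; omega⟩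
    else if c = ')' then ⟨([], cnt, t, true), by simp⟩
    else
      match parseB t cnt with
      | ⟨r, h⟩ => ⟨r, by simp only [List.length_cons]; omega⟩
termination_by l _ => l.length
decreasing_by
  · simp only [List.length_cons]; omega
  · simp only [List.length_cons] at *; omega
  · simp only [List.length_cons]; omega

def pro_alt (s : String) : List Int := (parseB s.toList 0).val.1

-- ===== PRECONDITION & SPEC =====
-- Pre_pro excludes exactly the strings on which A raises IndexError (pop from an
-- empty stack): those with a prefix containing more ')' than '('.
def Pre_pro (s : String) : Prop :=
  ∀ n ∈ List.range (s.toList.length + 1),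
    (s.toList.take n).count ')' ≤ (s.toList.take n).count '('
instance (s : String) : Decidable (Pre_pro s) := by unfold Pre_pro; infer_instance

def pvWitness_pro : String := "(a)(b(c))"

def Spec_pro (s : String) (out : List Int) : Prop := out = pro_alt s
instance (s : String) (out : List Int) : Decidable (Spec_pro s out) := by unfold Spec_pro; infer_instance

-- ===== CLAIM (what is proved, stated in full; the proofs are below) =====
def Claim_equal_pro : Prop := ∀ (s : String), Dom_pro s → Pre_pro s → Spec_pro s (pro s)

-- ===== LEMMAS AND PROOFS =====

-- unfold equations for parseB at the level of .val (avoiding subtype motives)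
lemma parseB_nil (cnt : Int) : (parseB [] cnt).val = ([], cnt, [], false) := by
  simp [parseB]

lemma parseB_open (t : List Char) (cnt : Int) :
    (parseB ('(' :: t) cnt).val =
      ((cnt + 1) :: ((parseB t (cnt + 1)).val.1
          ++ (if (parseB t (cnt + 1)).val.2.2.2 then [cnt + 1] else [])
          ++ (parseB (parseB t (cnt + 1)).val.2.2.1 (parseB t (cnt + 1)).val.2.1).val.1),
        (parseB (parseB t (cnt + 1)).val.2.2.1 (parseB t (cnt + 1)).val.2.1).val.2.1,
        (parseB (parseB t (cnt + 1)).val.2.2.1 (parseB t (cnt + 1)).val.2.1).val.2.2.1,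
        (parseB (parseB t (cnt + 1)).val.2.2.1 (parseB t (cnt + 1)).val.2.1).val.2.2.2) := by
  rw [parseB]
  rcases hp1 : parseB t (cnt + 1) with ⟨⟨r1, cnt1, rest1, b1⟩, h1⟩
  rcases hp2 : parseB rest1 cnt1 with ⟨⟨r2, cnt2, rest2, b2⟩, h2⟩
  simp [hp2]

lemma parseB_close (t : List Char) (cnt : Int) :
    (parseB (')' :: t) cnt).val = ([], cnt, t, true) := by
  rw [parseB]; simp

lemma parseB_other (c : Char) (t : List Char) (cnt : Int)
    (h1 : c ≠ '(') (h2 : c ≠ ')') :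
    (parseB (c :: t) cnt).val = (parseB t cnt).val := by
  rw [parseB]
  rcases hp : parseB t cnt with ⟨r, h⟩
  simp [h1, h2]

-- unfold equations for proRun on a cons
lemma proRun_open (t : List Char) (stack res : List Int) (cnt : Int) :
    proRun ('(' :: t) stack res cnt
      = proRun t (stack ++ [cnt + 1]) (res ++ [cnt + 1]) (cnt + 1) := by
  rw [proRun]; simp

lemma proRun_close (t : List Char) (stack res : List Int) (cnt : Int) :
    proRun (')' :: t) stack res cnt
      = match PySem.List.pop? stack with
        | none => none
        | some (x, stack') => proRun t stack' (res ++ [x]) cnt := by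
  rw [proRun]; simp

lemma proRun_other (c : Char) (t : List Char) (stack res : List Int) (cnt : Int)
    (h1 : c ≠ '(') (h2 : c ≠ ')') :
    proRun (c :: t) stack res cnt = proRun t stack res cnt := by
  rw [proRun]; simp [h1, h2]

-- If parseB did not end on a ')', it consumed the whole input.
lemma parseB_not_closed : ∀ (N : Nat) (l : List Char), l.length ≤ N → ∀ (cnt : Int),
    (parseB l cnt).val.2.2.2 = false → (parseB l cnt).val.2.2.1 = [] := by
  intro N
  induction N with
  | zero =>
    intro l hl cnt
    have : l = [] := List.length_eq_zero_iff.mp (Nat.le_zero.mp hl)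
    subst this
    simp [parseB_nil]
  | succ N ih =>
    intro l hl cnt
    match l with
    | [] => simp [parseB_nil]
    | c :: t =>
      have ht : t.length ≤ N := by simpa using hl
      by_cases hc : c = '('
      · subst hc
        have hr1 := (parseB t (cnt + 1)).property
        rw [parseB_open]
        intro hb
        exact ih _ (le_trans hr1 ht) _ hb
      · by_cases hc2 : c = ')'
        · subst hc2; rw [parseB_close]; intro h; exact absurd h (by simp)
        · rw [parseB_other c t cnt hc hc2]
          exact ih t ht cnt

-- parseB's remaining input is a suffix; when it ended on a ')', the consumed
-- prefix has exactly one more ')' than '('.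
lemma parseB_prefix : ∀ (N : Nat) (l : List Char), l.length ≤ N → ∀ (cnt : Int),
    ∃ p, l = p ++ (parseB l cnt).val.2.2.1 ∧
      ((parseB l cnt).val.2.2.2 = true → p.count ')' = p.count '(' + 1) := by
  intro N
  induction N with
  | zero =>
    intro l hl cnt
    have : l = [] := List.length_eq_zero_iff.mp (Nat.le_zero.mp hl)
    subst this
    exact ⟨[], by simp [parseB_nil]⟩
  | succ N ih =>
    intro l hl cnt
    match l with
    | [] => exact ⟨[], by simp [parseB_nil]⟩
    | c :: t =>
      have ht : t.length ≤ N := by simpa using hl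
      by_cases hc : c = '('
      · subst hc
        have hr1 := (parseB t (cnt + 1)).property
        obtain ⟨p1, hp1, hcnt1⟩ := ih t ht (cnt + 1)
        obtain ⟨p2, hp2, hcnt2⟩ :=
          ih (parseB t (cnt + 1)).val.2.2.1 (le_trans hr1 ht) (parseB t (cnt + 1)).val.2.1
        refine ⟨'(' :: (p1 ++ p2), ?_, ?_⟩
        · rw [parseB_open]
          conv_lhs => rw [hp1, hp2]
          simp
        · rw [parseB_open]
          intro hb2
          by_cases hcl1 : (parseB t (cnt + 1)).val.2.2.2 = true
          · have e1 := hcnt1 hcl1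
            have e2 := hcnt2 hb2
            have hA : (('(' : Char) == '(') = true := by decide
            have hB : (('(' : Char) == ')') = false := by decide
            simp only [List.count_cons, List.count_append, e1, e2, hA, hB,
              Bool.false_eq_true, if_true, if_false]
            omega
          · have hrest : (parseB t (cnt + 1)).val.2.2.1 = [] :=
              parseB_not_closed N t ht (cnt + 1) (by simpa using hcl1)
            rw [hrest, parseB_nil] at hb2
            exact absurd hb2 (by simp)
      · by_cases hc2 : c = ')'
        · subst hc2
          refine ⟨[')'], ?_, ?_⟩
          · rw [parseB_close]; rfl
          · intro _; decide
        · obtain ⟨p, hp, hcnt⟩ := ih t ht cnt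
          rw [parseB_other c t cnt hc hc2]
          refine ⟨c :: p, ?_, ?_⟩
          · conv_lhs => rw [hp]
            rfl
          · intro hb
            have := hcnt hb
            simp only [List.count_cons]
            simp [hc, hc2, this]

-- Main correspondence: running A's loop from any state equals B's parse of the
-- next segment, followed by a pop and A's loop on the remaining input.
lemma proRun_eq_parseB : ∀ (N : Nat) (l : List Char), l.length ≤ N →
    ∀ (stack res : List Int) (cnt : Int),
    proRun l stack res cnt =
      (if (parseB l cnt).val.2.2.2 then
        match PySem.List.pop? stack with
        | none => none
        | some (x, stack') =>
            proRun (parseB l cnt).val.2.2.1 stack'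
              (res ++ (parseB l cnt).val.1 ++ [x]) (parseB l cnt).val.2.1
      else some (res ++ (parseB l cnt).val.1)) := by
  intro N
  induction N with
  | zero =>
    intro l hl stack res cnt
    have : l = [] := List.length_eq_zero_iff.mp (Nat.le_zero.mp hl)
    subst this
    simp [parseB_nil, proRun]
  | succ N ih =>
    intro l hl stack res cnt
    match l with
    | [] => simp [parseB_nil, proRun]
    | c :: t =>
      have ht : t.length ≤ N := by simpa using hl
      by_cases hc : c = '('
      · subst hc
        have hr1 := (parseB t (cnt + 1)).property
        rw [proRun_open, parseB_open]
        rw [ih t ht (stack ++ [cnt + 1]) (res ++ [cnt + 1]) (cnt + 1)]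
        by_cases hcl1 : (parseB t (cnt + 1)).val.2.2.2 = true
        · simp only [hcl1, if_true, PySem.List.pop?_last]
          rw [ih (parseB t (cnt + 1)).val.2.2.1 (le_trans hr1 ht) stack
              (res ++ [cnt + 1] ++ (parseB t (cnt + 1)).val.1 ++ [cnt + 1])
              (parseB t (cnt + 1)).val.2.1]
          by_cases hb2 : (parseB (parseB t (cnt + 1)).val.2.2.1
              (parseB t (cnt + 1)).val.2.1).val.2.2.2 = true
          · simp only [hb2, if_true]
            cases hpop : PySem.List.pop? stack with
            | none => rfl
            | some r =>
              obtain ⟨x, stack'⟩ := r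
              simp only []
              congr 1
              simp
          · simp only [Bool.not_eq_true] at hb2
            simp only [hb2, Bool.false_eq_true, if_false]
            congr 1
            simp
        · simp only [Bool.not_eq_true] at hcl1
          have hrest : (parseB t (cnt + 1)).val.2.2.1 = [] :=
            parseB_not_closed N t ht (cnt + 1) hcl1
          rw [hrest]
          simp [parseB_nil, hcl1]
      · by_cases hc2 : c = ')'
        · subst hc2
          rw [proRun_close, parseB_close]
          simp only [if_true]
          cases hpop : PySem.List.pop? stack with
          | none => rfl
          | some r =>
            obtain ⟨x, stack'⟩ := r
            simp only []
            congr 1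
            simp
        · rw [proRun_other c t stack res cnt hc hc2, parseB_other c t cnt hc hc2]
          exact ih t ht stack res cnt

-- Under Pre_pro the top-level parse never ends on an unmatched ')'.
lemma parseB_top_not_closed (s : String) (hpre : Pre_pro s) :
    (parseB s.toList 0).val.2.2.2 = false := by
  by_contra hb
  simp only [Bool.not_eq_false] at hb
  obtain ⟨p, hp, hcnt⟩ := parseB_prefix s.toList.length s.toList le_rfl 0
  have he := hcnt hb
  have hlen : p.length ≤ s.toList.length := by
    conv_rhs => rw [hp]
    simp
  have hmem : p.length ∈ List.range (s.toList.length + 1) :=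
    List.mem_range.mpr (by omega)
  have := hpre p.length hmem
  rw [hp, List.take_left] at this
  omega

-- ===== VERDICT (by name: the statement is the Claim_ definition above) =====
theorem pro_spec : Claim_equal_pro := by
  intro s _ hpre
  unfold Spec_pro pro pro_alt
  rw [proRun_eq_parseB s.toList.length s.toList le_rfl [] [] 0]
  simp [parseB_top_not_closed s hpre]
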